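-- pv_equiv track=rewrite | github.com/egesualp/skills4cpp | src/skill_mapping/build_hierarchy.py | climb_to_pillars
-- ===== SOURCE A (Python) =====
-- from collections import defaultdict, deque
--
-- def climb_to_pillars(group_id, group2parents, pillar_ids):
--     """
--     Multi-hop, multi-parent upward traversal from a group_id to all reachable pillar_ids.
--     Returns a list of unique pillar IDs.
--     """
--     if group_id in pillar_ids:
--         return [group_id]
--     out = set()
--     q = deque([group_id])
--     seen = set()
--     while q:
--         g = q.popleft()
--         if g in seen:
--             continue
--         seen.add(g)
--         if g in pillar_ids:
--             out.add(g)
--             # don't stop; there shouldn't be parents above pillars, but we keep it safe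
--         for p in group2parents.get(g, []):
--             if p not in seen:
--                 q.append(p)
--     return sorted(out)
-- ===== SOURCE B (Python) =====
-- def climb_to_pillars(group_id, group2parents, pillar_ids):
--     """
--     Multi-hop, multi-parent upward traversal from a group_id to all reachable pillar_ids.
--     Returns a list of unique pillar IDs.
--     """
--     if group_id in pillar_ids:
--         return [group_id]
--     # Fixed-point iteration over the edge table (no queue, no frontier): sweep
--     # every key of the mapping, propagating parents of already-reached groups,
--     # until a whole sweep adds nothing; then filter the closure for pillars.
--     reach = {group_id}
--     changed = True
--     while changed:
--         changed = False
--         for k in group2parents: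
--             if k in reach:
--                 for p in group2parents[k]:
--                     if p not in reach:
--                         reach.add(p)
--                         changed = True
--     return sorted(g for g in reach if g in pillar_ids)
-- ===== Notes on version B (the rewrite author's own statement) =====
-- stated objective: alternative
-- what changed: Replaces the BFS worklist (deque + seen + incremental pillar collection) by a datalog-style fixed-point computation: repeated full sweeps over the whole edge table propagating parents of already-reached groups until a sweep changes nothing, then one final filter of the closure for pillars.
import Mathlib
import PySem

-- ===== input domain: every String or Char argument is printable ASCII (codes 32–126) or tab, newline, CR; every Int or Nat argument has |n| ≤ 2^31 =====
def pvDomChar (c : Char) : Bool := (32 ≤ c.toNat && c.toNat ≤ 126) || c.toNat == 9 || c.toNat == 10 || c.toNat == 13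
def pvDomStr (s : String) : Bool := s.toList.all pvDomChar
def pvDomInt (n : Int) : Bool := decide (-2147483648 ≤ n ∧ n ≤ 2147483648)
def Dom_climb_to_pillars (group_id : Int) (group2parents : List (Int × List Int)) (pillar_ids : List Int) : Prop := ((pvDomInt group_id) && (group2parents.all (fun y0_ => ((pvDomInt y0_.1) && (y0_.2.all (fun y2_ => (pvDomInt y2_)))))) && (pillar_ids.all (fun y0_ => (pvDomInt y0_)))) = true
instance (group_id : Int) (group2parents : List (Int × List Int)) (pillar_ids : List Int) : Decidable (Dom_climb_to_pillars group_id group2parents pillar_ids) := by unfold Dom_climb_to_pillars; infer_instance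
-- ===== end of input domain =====

-- B replaces A's BFS worklist (deque + seen + incremental pillar collection) by a
-- datalog-style fixed-point iteration: repeated full sweeps over the edge table
-- propagating parents of already-reached groups until nothing changes, then one
-- final filter of the closure for pillars; no speed claim.

-- ===== PORT A =====
-- group2parents.get(g, []) — the Python dict lookup (first match on the assoc list)
def pvParents (g2p : List (Int × List Int)) (g : Int) : List Int := PySem.Dict.getD ⟨g2p⟩ g []
-- universe of nodes ever reached and total parent-list size: used only to size the
-- fuel that makes each while-loop total (the loops provably never exhaust it)
def pvUni (gid : Int) (g2p : List (Int × List Int)) : List Int :=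
  PySem.List.dedup (gid :: g2p.flatMap (fun kv => kv.2))
def pvDeg (g2p : List (Int × List Int)) : Nat := (g2p.map (fun kv => kv.2.length)).sum

-- the while-loop of A: pop g, skip if seen, else mark, collect if pillar, enqueue unseen parents
def climbA_loop (g2p : List (Int × List Int)) (pil : List Int) :
    Nat → List Int → PySem.Set Int → PySem.Set Int → PySem.Set Int × PySem.Set Int
  | _, [], seen, out => (seen, out)
  | 0, _ :: _, seen, out => (seen, out)      -- fuel guard only; never reached
  | fuel+1, g :: q, seen, out =>
      if PySem.Set.contains seen g then climbA_loop g2p pil fuel q seen out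
      else
        let seen' := PySem.Set.add seen g
        let out' := if pil.contains g then PySem.Set.add out g else out
        climbA_loop g2p pil fuel
          (q ++ (pvParents g2p g).filter (fun p => !(PySem.Set.contains seen' p))) seen' out'

def climb_to_pillars (group_id : Int) (group2parents : List (Int × List Int)) (pillar_ids : List Int) : List Int :=
  if pillar_ids.contains group_id then [group_id]
  else
    PySem.List.sorted
      ((climbA_loop group2parents pillar_ids
          ((pvUni group_id group2parents).length * (pvDeg group2parents + 1) + 1)
          [group_id] PySem.Set.empty PySem.Set.empty).2)
      (fun x => x)

-- ===== PORT B =====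
-- the inner 'for p in group2parents[k]' loop of B: add each unseen parent, set changed
def climbB_add : List Int → PySem.Set Int → Bool → PySem.Set Int × Bool
  | [], reach, changed => (reach, changed)
  | p :: ps, reach, changed =>
      if PySem.Set.contains reach p then climbB_add ps reach changed
      else climbB_add ps (PySem.Set.add reach p) true

-- the 'for k in group2parents' sweep of B over the key table
def climbB_sweep (g2p : List (Int × List Int)) :
    List (Int × List Int) → PySem.Set Int → Bool → PySem.Set Int × Bool
  | [], reach, changed => (reach, changed)
  | kv :: rest, reach, changed =>
      if PySem.Set.contains reach kv.1 then
        climbB_sweep g2p rest (climbB_add (pvParents g2p kv.1) reach changed).1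
          (climbB_add (pvParents g2p kv.1) reach changed).2
      else climbB_sweep g2p rest reach changed

-- the 'while changed' loop of B: sweep until a whole sweep changes nothing
def climbB_loop (g2p : List (Int × List Int)) : Nat → PySem.Set Int → PySem.Set Int
  | 0, reach => reach                         -- fuel guard only; never reached
  | fuel+1, reach =>
      if (climbB_sweep g2p g2p reach false).2 then
        climbB_loop g2p fuel (climbB_sweep g2p g2p reach false).1
      else (climbB_sweep g2p g2p reach false).1

def climb_to_pillars_alt (group_id : Int) (group2parents : List (Int × List Int)) (pillar_ids : List Int) : List Int :=
  if pillar_ids.contains group_id then [group_id]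
  else
    PySem.List.sorted
      ((climbB_loop group2parents ((pvUni group_id group2parents).length + 1)
          (PySem.Set.add PySem.Set.empty group_id)).filter
        (fun g => pillar_ids.contains g))
      (fun x => x)

-- ===== PRECONDITION & SPEC =====
def Spec_climb_to_pillars (group_id : Int) (group2parents : List (Int × List Int)) (pillar_ids : List Int) (out : List Int) : Prop := out = climb_to_pillars_alt group_id group2parents pillar_ids
instance (group_id : Int) (group2parents : List (Int × List Int)) (pillar_ids : List Int) (out : List Int) : Decidable (Spec_climb_to_pillars group_id group2parents pillar_ids out) := by unfold Spec_climb_to_pillars; infer_instance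

-- ===== CLAIM (what is proved, stated in full; the proofs are below) =====
def Claim_equal_climb_to_pillars : Prop := ∀ (group_id : Int) (group2parents : List (Int × List Int)) (pillar_ids : List Int), Dom_climb_to_pillars group_id group2parents pillar_ids → Spec_climb_to_pillars group_id group2parents pillar_ids (climb_to_pillars group_id group2parents pillar_ids)

-- ===== LEMMAS AND PROOFS =====

-- the parent edge relation and reachability along it
def pvEdge (g2p : List (Int × List Int)) (a b : Int) : Prop := b ∈ pvParents g2p a
def pvReach (g2p : List (Int × List Int)) (s x : Int) : Prop :=
  Relation.ReflTransGen (pvEdge g2p) s x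
def pvUnseen (gid : Int) (g2p : List (Int × List Int)) (seen : PySem.Set Int) : Nat :=
  ((pvUni gid g2p).filter (fun x => !(PySem.Set.contains seen x))).length

lemma pvParents_nil (g : Int) : pvParents [] g = [] := rfl

lemma pvParents_cons (kv : Int × List Int) (t : List (Int × List Int)) (g : Int) :
    pvParents (kv :: t) g = if kv.1 == g then kv.2 else pvParents t g := by
  obtain ⟨k, v⟩ := kv
  rw [pvParents, pvParents, PySem.Dict.getD_eq_get?_getD, PySem.Dict.getD_eq_get?_getD,
    PySem.Dict.get?_mk_cons]
  by_cases hk : k == g <;> simp [hk]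

lemma pvParents_subset_flatMap (g2p : List (Int × List Int)) (g p : Int)
    (h : p ∈ pvParents g2p g) : p ∈ g2p.flatMap (fun kv => kv.2) := by
  induction g2p with
  | nil => rw [pvParents_nil] at h; simp at h
  | cons kv t ih =>
    rw [pvParents_cons] at h
    rw [List.flatMap_cons]
    by_cases hk : kv.1 == g
    · rw [if_pos hk] at h; exact List.mem_append.mpr (Or.inl h)
    · rw [if_neg hk] at h; exact List.mem_append.mpr (Or.inr (ih h))

lemma pvParents_key_mem (g2p : List (Int × List Int)) (g p : Int)
    (h : p ∈ pvParents g2p g) : ∃ kv ∈ g2p, kv.1 = g := by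
  induction g2p with
  | nil => rw [pvParents_nil] at h; simp at h
  | cons kv t ih =>
    rw [pvParents_cons] at h
    by_cases hk : kv.1 == g
    · exact ⟨kv, List.mem_cons_self, by simpa using hk⟩
    · rcases ih (by rwa [if_neg hk] at h) with ⟨kv', h1, h2⟩
      exact ⟨kv', List.mem_cons_of_mem _ h1, h2⟩

lemma pvParents_len_le (g2p : List (Int × List Int)) (g : Int) :
    (pvParents g2p g).length ≤ pvDeg g2p := by
  induction g2p with
  | nil => rw [pvParents_nil]; simp
  | cons kv t ih =>
    have hdeg : pvDeg (kv :: t) = kv.2.length + pvDeg t := by simp [pvDeg]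
    rw [pvParents_cons]
    by_cases hk : kv.1 == g
    · rw [if_pos hk]; omega
    · rw [if_neg hk]; omega

lemma pvBang (s : PySem.Set Int) (y : Int) :
    ((!(PySem.Set.contains s y)) = true) ↔ y ∉ s := by
  simp

lemma pvFilter_len_mono (l : List Int) (p q : Int → Bool)
    (h : ∀ y, q y = true → p y = true) : (l.filter q).length ≤ (l.filter p).length := by
  induction l with
  | nil => simp
  | cons a t ih =>
    by_cases hq : q a = true
    · simp [hq, h a hq]; omega
    · simp only [List.filter_cons]
      rw [Bool.not_eq_true] at hq
      cases hp : p a <;> simp [hq] <;> omega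

lemma pvFilter_len_lt (l : List Int) (p q : Int → Bool)
    (h : ∀ y, q y = true → p y = true) (x : Int) (hx : x ∈ l)
    (hpx : p x = true) (hqx : q x = false) :
    (l.filter q).length < (l.filter p).length := by
  induction l with
  | nil => simp at hx
  | cons a t ih =>
    rcases List.mem_cons.mp hx with rfl | hxt
    · have h1 := pvFilter_len_mono t p q h
      simp [hpx, hqx]; omega
    · have := ih hxt
      by_cases hq : q a = true
      · simp [hq, h a hq]; omega
      · rw [Bool.not_eq_true] at hq
        cases hp : p a <;> simp [hq, hp] <;> omega

lemma pvUnseen_lt (gid : Int) (g2p : List (Int × List Int)) (s t : PySem.Set Int)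
    (h : ∀ x, x ∈ s → x ∈ t) (x : Int) (hxU : x ∈ pvUni gid g2p)
    (hxs : x ∉ s) (hxt : x ∈ t) : pvUnseen gid g2p t < pvUnseen gid g2p s := by
  unfold pvUnseen
  refine pvFilter_len_lt _ _ _
    (fun y hy => (pvBang s y).mpr (fun hys => (pvBang t y).mp hy (h y hys))) x hxU
    ((pvBang s x).mpr hxs) ?_
  simp
  exact hxt

lemma pvUnseen_empty (gid : Int) (g2p : List (Int × List Int)) :
    pvUnseen gid g2p PySem.Set.empty = (pvUni gid g2p).length := by
  simp [pvUnseen, PySem.Set.empty, PySem.Set.contains]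

lemma pvClosed_reach (g2p : List (Int × List Int)) (seen : PySem.Set Int)
    (hcl : ∀ h ∈ seen, ∀ p ∈ pvParents g2p h, p ∈ seen) :
    ∀ s x : Int, s ∈ seen → pvReach g2p s x → x ∈ seen := by
  intro s x hs hr
  induction hr with
  | refl => exact hs
  | tail _ e ih => exact hcl _ ih _ e

lemma climbA_out_inv (g2p : List (Int × List Int)) (pil : List Int) :
    ∀ (fuel : Nat) (q : List Int) (seen out : PySem.Set Int),
      (∀ x : Int, x ∈ out ↔ x ∈ seen ∧ pil.contains x = true) →
      ∀ x : Int, x ∈ (climbA_loop g2p pil fuel q seen out).2 ↔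
        x ∈ (climbA_loop g2p pil fuel q seen out).1 ∧ pil.contains x = true := by
  intro fuel
  induction fuel with
  | zero => intro q seen out h x; cases q <;> simpa [climbA_loop] using h x
  | succ f ih =>
    intro q seen out h x
    cases q with
    | nil => simpa [climbA_loop] using h x
    | cons g q =>
      rw [climbA_loop]
      by_cases hg : PySem.Set.contains seen g
      · simp only [hg, if_true]; exact ih q seen out h x
      · simp only [hg, Bool.false_eq_true, if_false]
        apply ih
        intro y
        by_cases hp : pil.contains g = true
        · simp only [hp, if_true, PySem.Set.mem_add]
          constructor
          · rintro (hy | rfl)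
            · rcases (h y).mp hy with ⟨hs, hpy⟩
              exact ⟨Or.inl hs, hpy⟩
            · exact ⟨Or.inr rfl, hp⟩
          · rintro ⟨hs | rfl, hpy⟩
            · exact Or.inl ((h y).mpr ⟨hs, hpy⟩)
            · exact Or.inr rfl
        · simp only [hp, PySem.Set.mem_add]
          constructor
          · intro hy
            rcases (h y).mp hy with ⟨hs, hpy⟩
            exact ⟨Or.inl hs, hpy⟩
          · rintro ⟨hs | rfl, hpy⟩
            · exact (h y).mpr ⟨hs, hpy⟩
            · exact absurd hpy hp

lemma climbA_out_nodup (g2p : List (Int × List Int)) (pil : List Int) :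
    ∀ (fuel : Nat) (q : List Int) (seen out : PySem.Set Int),
      out.Nodup → ((climbA_loop g2p pil fuel q seen out).2).Nodup := by
  intro fuel
  induction fuel with
  | zero => intro q seen out h; cases q <;> simpa [climbA_loop]
  | succ f ih =>
    intro q seen out h
    cases q with
    | nil => simpa [climbA_loop]
    | cons g q =>
      rw [climbA_loop]
      by_cases hg : PySem.Set.contains seen g
      · simp only [hg, if_true]; exact ih q seen out h
      · simp only [hg, Bool.false_eq_true, if_false]
        apply ih
        by_cases hp : g ∈ pil
        · simpa [hp] using PySem.Set.nodup_add out g h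
        · simpa [hp] using h

lemma climbA_sound (g2p : List (Int × List Int)) (pil : List Int) (gid : Int) :
    ∀ (fuel : Nat) (q : List Int) (seen out : PySem.Set Int),
      (∀ g ∈ q, pvReach g2p gid g) → (∀ g ∈ seen, pvReach g2p gid g) →
      ∀ x ∈ (climbA_loop g2p pil fuel q seen out).1, pvReach g2p gid x := by
  intro fuel
  induction fuel with
  | zero => intro q seen out _ hseen x hx; cases q <;> simp [climbA_loop] at hx <;> exact hseen x hx
  | succ f ih =>
    intro q seen out hq hseen x hx
    cases q with
    | nil => simp [climbA_loop] at hx; exact hseen x hx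
    | cons g q =>
      rw [climbA_loop] at hx
      by_cases hg : PySem.Set.contains seen g
      · simp only [hg, if_true] at hx
        exact ih q seen out (fun g' hg' => hq g' (List.mem_cons_of_mem _ hg')) hseen x hx
      · simp only [hg, Bool.false_eq_true, if_false] at hx
        refine ih _ _ _ ?_ ?_ x hx
        · intro g' hg'
          rcases List.mem_append.mp hg' with h1 | h1
          · exact hq g' (List.mem_cons_of_mem _ h1)
          · have h2 := List.mem_filter.mp h1
            exact Relation.ReflTransGen.tail (hq g (List.mem_cons_self)) h2.1
        · intro g' hg'
          rcases (PySem.Set.mem_add seen g g').mp hg' with h1 | rfl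
          · exact hseen g' h1
          · exact hq g' List.mem_cons_self

lemma climbA_complete (g2p : List (Int × List Int)) (pil : List Int) (gid : Int) :
    ∀ (fuel : Nat) (q : List Int) (seen out : PySem.Set Int),
      pvUnseen gid g2p seen * (pvDeg g2p + 1) + q.length ≤ fuel →
      (∀ g ∈ q, g ∈ pvUni gid g2p) →
      (∀ h ∈ seen, ∀ p ∈ pvParents g2p h, p ∈ seen ∨ p ∈ q) →
      ∀ s x : Int, (s ∈ seen ∨ s ∈ q) → pvReach g2p s x →
        x ∈ (climbA_loop g2p pil fuel q seen out).1 := by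
  intro fuel
  induction fuel with
  | zero =>
    intro q seen out hm hqU hcl s x hs hr
    have hq0 : q = [] := by
      cases q with
      | nil => rfl
      | cons a t =>
        exfalso
        generalize pvUnseen gid g2p seen * (pvDeg g2p + 1) = b at hm
        simp only [List.length_cons] at hm
        omega
    subst hq0
    simp only [climbA_loop]
    have hcl' : ∀ h ∈ seen, ∀ p ∈ pvParents g2p h, p ∈ seen := by
      intro h hh p hp
      rcases hcl h hh p hp with h1 | h1
      · exact h1
      · simp at h1
    rcases hs with h1 | h1
    · exact pvClosed_reach g2p seen hcl' s x h1 hr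
    · simp at h1
  | succ f ih =>
    intro q seen out hm hqU hcl s x hs hr
    cases q with
    | nil =>
      simp only [climbA_loop]
      have hcl' : ∀ h ∈ seen, ∀ p ∈ pvParents g2p h, p ∈ seen := by
        intro h hh p hp
        rcases hcl h hh p hp with h1 | h1
        · exact h1
        · simp at h1
      rcases hs with h1 | h1
      · exact pvClosed_reach g2p seen hcl' s x h1 hr
      · simp at h1
    | cons g q =>
      rw [climbA_loop]
      by_cases hg : PySem.Set.contains seen g
      · simp only [hg, if_true]
        have hgseen : g ∈ seen := (PySem.Set.contains_iff seen g).mp hg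
        refine ih q seen out ?_ ?_ ?_ s x ?_ hr
        · generalize pvUnseen gid g2p seen * (pvDeg g2p + 1) = b at hm ⊢
          simp only [List.length_cons] at hm
          omega
        · intro g' h; exact hqU g' (List.mem_cons_of_mem _ h)
        · intro h hh p hp
          rcases hcl h hh p hp with h1 | h1
          · exact Or.inl h1
          · rcases List.mem_cons.mp h1 with rfl | h2
            · exact Or.inl hgseen
            · exact Or.inr h2
        · rcases hs with h1 | h1
          · exact Or.inl h1
          · rcases List.mem_cons.mp h1 with rfl | h2
            · exact Or.inl hgseen
            · exact Or.inr h2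
      · simp only [hg, Bool.false_eq_true, if_false]
        have hgU : g ∈ pvUni gid g2p := hqU g List.mem_cons_self
        have hgns : g ∉ seen := fun hmem => hg ((PySem.Set.contains_iff seen g).mpr hmem)
        refine ih _ _ _ ?_ ?_ ?_ s x ?_ hr
        · -- measure decreases by at least 2
          have hlt : pvUnseen gid g2p (PySem.Set.add seen g) < pvUnseen gid g2p seen :=
            pvUnseen_lt gid g2p seen (PySem.Set.add seen g)
              (fun y hy => (PySem.Set.mem_add seen g y).mpr (Or.inl hy)) g hgU hgns
              ((PySem.Set.mem_add seen g g).mpr (Or.inr rfl))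
          have hfl : ((pvParents g2p g).filter
              (fun p => !(PySem.Set.contains (PySem.Set.add seen g) p))).length ≤ pvDeg g2p :=
            le_trans (List.length_filter_le _ _) (pvParents_len_le g2p g)
          have key : pvUnseen gid g2p (PySem.Set.add seen g) * (pvDeg g2p + 1) + (pvDeg g2p + 1)
              ≤ pvUnseen gid g2p seen * (pvDeg g2p + 1) := by
            calc pvUnseen gid g2p (PySem.Set.add seen g) * (pvDeg g2p + 1) + (pvDeg g2p + 1)
                = (pvUnseen gid g2p (PySem.Set.add seen g) + 1) * (pvDeg g2p + 1) := by ring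
              _ ≤ pvUnseen gid g2p seen * (pvDeg g2p + 1) :=
                  Nat.mul_le_mul (Nat.succ_le_of_lt hlt) (le_refl _)
          rw [List.length_append]
          generalize pvUnseen gid g2p (PySem.Set.add seen g) * (pvDeg g2p + 1) = a at key ⊢
          generalize pvUnseen gid g2p seen * (pvDeg g2p + 1) = b at key hm
          simp only [List.length_cons] at hm
          omega
        · intro g' hg'
          rcases List.mem_append.mp hg' with h1 | h1
          · exact hqU g' (List.mem_cons_of_mem _ h1)
          · have h2 := (List.mem_filter.mp h1).1
            have h3 := pvParents_subset_flatMap g2p g g' h2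
            rw [pvUni, PySem.List.mem_dedup]
            exact List.mem_cons_of_mem _ h3
        · intro h hh p hp
          rcases (PySem.Set.mem_add seen g h).mp hh with h1 | rfl
          · rcases hcl h h1 p hp with h2 | h2
            · exact Or.inl ((PySem.Set.mem_add seen g p).mpr (Or.inl h2))
            · rcases List.mem_cons.mp h2 with rfl | h3
              · exact Or.inl ((PySem.Set.mem_add seen p p).mpr (Or.inr rfl))
              · exact Or.inr (List.mem_append.mpr (Or.inl h3))
          · by_cases hc : PySem.Set.contains (PySem.Set.add seen h) p
            · exact Or.inl ((PySem.Set.contains_iff _ p).mp hc)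
            · refine Or.inr (List.mem_append.mpr (Or.inr ?_))
              refine List.mem_filter.mpr ⟨hp, ?_⟩
              have hpm : p ∉ PySem.Set.add seen h :=
                fun hm => hc ((PySem.Set.contains_iff _ _).mpr hm)
              rw [PySem.Set.mem_add] at hpm
              rw [not_or] at hpm
              simp
              exact hpm
        · rcases hs with h1 | h1
          · exact Or.inl ((PySem.Set.mem_add seen g s).mpr (Or.inl h1))
          · rcases List.mem_cons.mp h1 with rfl | h2
            · exact Or.inl ((PySem.Set.mem_add seen s s).mpr (Or.inr rfl))
            · exact Or.inr (List.mem_append.mpr (Or.inl h2))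

-- ----- B-side lemmas: the inner add loop -----

lemma climbB_add_mem (ps : List Int) :
    ∀ (r : PySem.Set Int) (c : Bool) (x : Int),
      x ∈ (climbB_add ps r c).1 ↔ x ∈ r ∨ x ∈ ps := by
  induction ps with
  | nil => intro r c x; simp [climbB_add]
  | cons p ps ih =>
    intro r c x
    rw [climbB_add]
    by_cases hp : PySem.Set.contains r p
    · have hpr : p ∈ r := (PySem.Set.contains_iff r p).mp hp
      rw [if_pos hp, ih]
      constructor
      · rintro (h | h)
        · exact Or.inl h
        · exact Or.inr (List.mem_cons_of_mem _ h)
      · rintro (h | h)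
        · exact Or.inl h
        · rcases List.mem_cons.mp h with rfl | h2
          · exact Or.inl hpr
          · exact Or.inr h2
    · rw [if_neg hp, ih, PySem.Set.mem_add]
      constructor
      · rintro ((h | rfl) | h)
        · exact Or.inl h
        · exact Or.inr List.mem_cons_self
        · exact Or.inr (List.mem_cons_of_mem _ h)
      · rintro (h | h)
        · exact Or.inl (Or.inl h)
        · rcases List.mem_cons.mp h with rfl | h2
          · exact Or.inl (Or.inr rfl)
          · exact Or.inr h2

lemma climbB_add_flag_mono (ps : List Int) :
    ∀ (r : PySem.Set Int), (climbB_add ps r true).2 = true := by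
  induction ps with
  | nil => intro r; simp [climbB_add]
  | cons p ps ih =>
    intro r
    rw [climbB_add]
    by_cases hp : PySem.Set.contains r p
    · rw [if_pos hp]; exact ih r
    · rw [if_neg hp]; exact ih _

lemma climbB_add_unchanged (ps : List Int) :
    ∀ (r : PySem.Set Int), (climbB_add ps r false).2 = false →
      (climbB_add ps r false).1 = r ∧ ∀ p ∈ ps, p ∈ r := by
  induction ps with
  | nil => intro r _; exact ⟨rfl, by simp⟩
  | cons p ps ih =>
    intro r h
    rw [climbB_add] at h ⊢
    by_cases hp : PySem.Set.contains r p
    · rw [if_pos hp] at h ⊢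
      rcases ih r h with ⟨h1, h2⟩
      refine ⟨h1, ?_⟩
      intro p' hp'
      rcases List.mem_cons.mp hp' with rfl | h3
      · exact (PySem.Set.contains_iff r p').mp hp
      · exact h2 p' h3
    · rw [if_neg hp] at h
      rw [climbB_add_flag_mono ps _] at h
      simp at h
lemma climbB_add_growth (ps : List Int) :
    ∀ (r : PySem.Set Int), (climbB_add ps r false).2 = true →
      ∃ p ∈ ps, p ∉ r ∧ p ∈ (climbB_add ps r false).1 := by
  induction ps with
  | nil => intro r h; simp [climbB_add] at h
  | cons p ps ih =>
    intro r h
    rw [climbB_add] at h ⊢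
    by_cases hp : PySem.Set.contains r p
    · rw [if_pos hp] at h ⊢
      rcases ih r h with ⟨p', h1, h2, h3⟩
      exact ⟨p', List.mem_cons_of_mem _ h1, h2, h3⟩
    · rw [if_neg hp] at h ⊢
      refine ⟨p, List.mem_cons_self, fun hm => hp ((PySem.Set.contains_iff r p).mpr hm), ?_⟩
      rw [climbB_add_mem]
      exact Or.inl ((PySem.Set.mem_add r p p).mpr (Or.inr rfl))

lemma climbB_add_nodup (ps : List Int) :
    ∀ (r : PySem.Set Int) (c : Bool), r.Nodup → ((climbB_add ps r c).1).Nodup := by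
  induction ps with
  | nil => intro r c h; simpa [climbB_add]
  | cons p ps ih =>
    intro r c h
    rw [climbB_add]
    by_cases hp : PySem.Set.contains r p
    · rw [if_pos hp]; exact ih r c h
    · rw [if_neg hp]; exact ih _ _ (PySem.Set.nodup_add r p h)

-- ----- B-side lemmas: one sweep over the key table -----

lemma climbB_sweep_mono (g2p : List (Int × List Int)) :
    ∀ (l : List (Int × List Int)) (r : PySem.Set Int) (c : Bool) (x : Int),
      x ∈ r → x ∈ (climbB_sweep g2p l r c).1 := by
  intro l
  induction l with
  | nil => intro r c x hx; simpa [climbB_sweep]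
  | cons kv rest ih =>
    intro r c x hx
    rw [climbB_sweep]
    by_cases hk : PySem.Set.contains r kv.1
    · rw [if_pos hk]
      exact ih _ _ x ((climbB_add_mem _ _ _ x).mpr (Or.inl hx))
    · rw [if_neg hk]; exact ih r c x hx

lemma climbB_sweep_flag_mono (g2p : List (Int × List Int)) :
    ∀ (l : List (Int × List Int)) (r : PySem.Set Int),
      (climbB_sweep g2p l r true).2 = true := by
  intro l
  induction l with
  | nil => intro r; simp [climbB_sweep]
  | cons kv rest ih =>
    intro r
    rw [climbB_sweep]
    by_cases hk : PySem.Set.contains r kv.1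
    · rw [if_pos hk, climbB_add_flag_mono]; exact ih _
    · rw [if_neg hk]; exact ih r

lemma climbB_sweep_sound (g2p : List (Int × List Int)) (gid : Int) :
    ∀ (l : List (Int × List Int)) (r : PySem.Set Int) (c : Bool),
      (∀ x ∈ r, pvReach g2p gid x) →
      ∀ x ∈ (climbB_sweep g2p l r c).1, pvReach g2p gid x := by
  intro l
  induction l with
  | nil => intro r c hr x hx; rw [climbB_sweep] at hx; exact hr x hx
  | cons kv rest ih =>
    intro r c hr x hx
    rw [climbB_sweep] at hx
    by_cases hk : PySem.Set.contains r kv.1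
    · rw [if_pos hk] at hx
      refine ih _ _ ?_ x hx
      intro y hy
      rcases (climbB_add_mem _ _ _ y).mp hy with h1 | h1
      · exact hr y h1
      · exact Relation.ReflTransGen.tail (hr kv.1 ((PySem.Set.contains_iff r kv.1).mp hk)) h1
    · rw [if_neg hk] at hx; exact ih r c hr x hx

lemma climbB_sweep_unchanged (g2p : List (Int × List Int)) :
    ∀ (l : List (Int × List Int)) (r : PySem.Set Int),
      (climbB_sweep g2p l r false).2 = false →
      (climbB_sweep g2p l r false).1 = r ∧
        ∀ kv ∈ l, PySem.Set.contains r kv.1 = true → ∀ p ∈ pvParents g2p kv.1, p ∈ r := by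
  intro l
  induction l with
  | nil => intro r _; exact ⟨rfl, by simp⟩
  | cons kv rest ih =>
    intro r h
    rw [climbB_sweep] at h ⊢
    by_cases hk : PySem.Set.contains r kv.1
    · rw [if_pos hk] at h ⊢
      have hc : (climbB_add (pvParents g2p kv.1) r false).2 = false := by
        by_contra hcc
        rw [Bool.not_eq_false] at hcc
        rw [hcc, climbB_sweep_flag_mono] at h
        simp at h
      rcases climbB_add_unchanged _ r hc with ⟨he, hps⟩
      rw [he, hc] at h ⊢
      rcases ih r h with ⟨h1, h2⟩
      refine ⟨h1, ?_⟩
      intro kv' hkv' hck' p hp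
      rcases List.mem_cons.mp hkv' with rfl | h3
      · exact hps p hp
      · exact h2 kv' h3 hck' p hp
    · rw [if_neg hk] at h ⊢
      rcases ih r h with ⟨h1, h2⟩
      refine ⟨h1, ?_⟩
      intro kv' hkv' hck' p hp
      rcases List.mem_cons.mp hkv' with rfl | h3
      · exact absurd hck' (by simpa using hk)
      · exact h2 kv' h3 hck' p hp

lemma climbB_sweep_growth (g2p : List (Int × List Int)) :
    ∀ (l : List (Int × List Int)) (r : PySem.Set Int),
      (climbB_sweep g2p l r false).2 = true →
      ∃ x, x ∈ (climbB_sweep g2p l r false).1 ∧ x ∉ r ∧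
        x ∈ g2p.flatMap (fun kv => kv.2) := by
  intro l
  induction l with
  | nil => intro r h; simp [climbB_sweep] at h
  | cons kv rest ih =>
    intro r h
    rw [climbB_sweep] at h ⊢
    by_cases hk : PySem.Set.contains r kv.1
    · rw [if_pos hk] at h ⊢
      by_cases hc : (climbB_add (pvParents g2p kv.1) r false).2 = true
      · rcases climbB_add_growth _ r hc with ⟨p, h1, h2, h3⟩
        refine ⟨p, ?_, h2, pvParents_subset_flatMap g2p kv.1 p h1⟩
        exact climbB_sweep_mono g2p rest _ _ p h3
      · rw [Bool.not_eq_true] at hc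
        rcases climbB_add_unchanged _ r hc with ⟨he, _⟩
        rw [he, hc] at h ⊢
        exact ih r h
    · rw [if_neg hk] at h ⊢
      exact ih r h

lemma climbB_sweep_nodup (g2p : List (Int × List Int)) :
    ∀ (l : List (Int × List Int)) (r : PySem.Set Int) (c : Bool),
      r.Nodup → ((climbB_sweep g2p l r c).1).Nodup := by
  intro l
  induction l with
  | nil => intro r c h; simpa [climbB_sweep]
  | cons kv rest ih =>
    intro r c h
    rw [climbB_sweep]
    by_cases hk : PySem.Set.contains r kv.1
    · rw [if_pos hk]; exact ih _ _ (climbB_add_nodup _ r c h)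
    · rw [if_neg hk]; exact ih r c h

-- ----- B-side lemmas: the while loop -----

lemma climbB_loop_sound (g2p : List (Int × List Int)) (gid : Int) :
    ∀ (fuel : Nat) (r : PySem.Set Int),
      (∀ x ∈ r, pvReach g2p gid x) →
      ∀ x ∈ climbB_loop g2p fuel r, pvReach g2p gid x := by
  intro fuel
  induction fuel with
  | zero => intro r hr x hx; rw [climbB_loop] at hx; exact hr x hx
  | succ f ih =>
    intro r hr x hx
    rw [climbB_loop] at hx
    by_cases hc : (climbB_sweep g2p g2p r false).2 = true
    · rw [hc, if_pos rfl] at hx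
      exact ih _ (climbB_sweep_sound g2p gid g2p r false hr) x hx
    · rw [Bool.not_eq_true] at hc
      rw [hc] at hx
      simp only [Bool.false_eq_true, if_false] at hx
      exact climbB_sweep_sound g2p gid g2p r false hr x hx

lemma climbB_loop_nodup (g2p : List (Int × List Int)) :
    ∀ (fuel : Nat) (r : PySem.Set Int), r.Nodup → (climbB_loop g2p fuel r).Nodup := by
  intro fuel
  induction fuel with
  | zero => intro r h; simpa [climbB_loop]
  | succ f ih =>
    intro r h
    rw [climbB_loop]
    by_cases hc : (climbB_sweep g2p g2p r false).2 = true
    · rw [hc, if_pos rfl]; exact ih _ (climbB_sweep_nodup g2p g2p r false h)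
    · rw [Bool.not_eq_true] at hc
      rw [hc]
      simp only [Bool.false_eq_true, if_false]
      exact climbB_sweep_nodup g2p g2p r false h

lemma climbB_loop_complete (gid : Int) (g2p : List (Int × List Int)) :
    ∀ (fuel : Nat) (r : PySem.Set Int),
      pvUnseen gid g2p r + 1 ≤ fuel →
      (∀ x ∈ r, x ∈ climbB_loop g2p fuel r) ∧
        (∀ h ∈ climbB_loop g2p fuel r, ∀ p ∈ pvParents g2p h,
          p ∈ climbB_loop g2p fuel r) := by
  intro fuel
  induction fuel with
  | zero => intro r hm; omega
  | succ f ih =>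
    intro r hm
    rw [climbB_loop]
    by_cases hc : (climbB_sweep g2p g2p r false).2 = true
    · rw [hc, if_pos rfl]
      rcases climbB_sweep_growth g2p g2p r hc with ⟨x, hx1, hx2, hx3⟩
      have hxU : x ∈ pvUni gid g2p := by
        rw [pvUni, PySem.List.mem_dedup]
        exact List.mem_cons_of_mem _ hx3
      have hlt : pvUnseen gid g2p (climbB_sweep g2p g2p r false).1 < pvUnseen gid g2p r :=
        pvUnseen_lt gid g2p r _ (climbB_sweep_mono g2p g2p r false) x hxU hx2 hx1
      rcases ih (climbB_sweep g2p g2p r false).1 (by omega) with ⟨h1, h2⟩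
      exact ⟨fun y hy => h1 y (climbB_sweep_mono g2p g2p r false y hy), h2⟩
    · rw [Bool.not_eq_true] at hc
      rw [hc]
      simp only [Bool.false_eq_true, if_false]
      rcases climbB_sweep_unchanged g2p g2p r hc with ⟨he, hcl⟩
      rw [he]
      refine ⟨fun y hy => hy, ?_⟩
      intro h hh p hp
      rcases pvParents_key_mem g2p h p hp with ⟨kv, hkv, hk⟩
      refine hcl kv hkv ?_ p (by rwa [hk])
      rw [hk]
      exact (PySem.Set.contains_iff r h).mpr hh

-- ===== VERDICT (by name: the statement is the Claim_ definition above) =====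
theorem climb_to_pillars_spec : Claim_equal_climb_to_pillars := by
  intro gid g2p pil _
  unfold Spec_climb_to_pillars climb_to_pillars climb_to_pillars_alt
  by_cases hp : pil.contains gid = true
  · rw [if_pos hp, if_pos hp]
  · rw [if_neg hp, if_neg hp]
    have hAchar : ∀ x, x ∈ (climbA_loop g2p pil
        ((pvUni gid g2p).length * (pvDeg g2p + 1) + 1) [gid] PySem.Set.empty PySem.Set.empty).2
        ↔ (pil.contains x = true ∧ pvReach g2p gid x) := by
      intro x
      constructor
      · intro hx
        have h1 := (climbA_out_inv g2p pil _ [gid] _ _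
          (by intro y; simp [PySem.Set.empty]) x).mp hx
        refine ⟨h1.2, climbA_sound g2p pil gid _ [gid] _ _ ?_ ?_ x h1.1⟩
        · intro g h; simp at h; subst h; exact Relation.ReflTransGen.refl
        · intro g h; simp [PySem.Set.empty] at h
      · rintro ⟨hpx, hrx⟩
        refine (climbA_out_inv g2p pil _ [gid] _ _
          (by intro y; simp [PySem.Set.empty]) x).mpr ⟨?_, hpx⟩
        refine climbA_complete g2p pil gid _ [gid] _ _ ?_ ?_ ?_ gid x (Or.inr (by simp)) hrx
        · rw [pvUnseen_empty]; simp
        · intro g h; simp at h; subst h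
          rw [pvUni, PySem.List.mem_dedup]
          exact List.mem_cons_self
        · intro h hh; simp [PySem.Set.empty] at hh
    have hBchar : ∀ x, x ∈ climbB_loop g2p ((pvUni gid g2p).length + 1)
        (PySem.Set.add PySem.Set.empty gid) ↔ pvReach g2p gid x := by
      have hr0 : PySem.Set.add PySem.Set.empty gid = [gid] := rfl
      intro x
      constructor
      · intro hx
        refine climbB_loop_sound g2p gid _ _ ?_ x hx
        intro y hy
        rw [hr0] at hy
        simp at hy
        subst hy
        exact Relation.ReflTransGen.refl
      · intro hrx
        have hfuel : pvUnseen gid g2p (PySem.Set.add PySem.Set.empty gid) + 1 ≤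
            (pvUni gid g2p).length + 1 := by
          have := pvFilter_len_mono (pvUni gid g2p)
            (fun _ => true) (fun x => !(PySem.Set.contains (PySem.Set.add PySem.Set.empty gid) x))
            (fun y _ => rfl)
          simp only [List.filter_true] at this
          unfold pvUnseen
          omega
        rcases climbB_loop_complete gid g2p _ _ hfuel with ⟨h1, h2⟩
        have hgid : gid ∈ climbB_loop g2p ((pvUni gid g2p).length + 1)
            (PySem.Set.add PySem.Set.empty gid) := h1 gid (by rw [hr0]; simp)
        exact pvClosed_reach g2p _ h2 gid x hgid hrx
    have hAnodup : ((climbA_loop g2p pil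
        ((pvUni gid g2p).length * (pvDeg g2p + 1) + 1) [gid] PySem.Set.empty PySem.Set.empty).2).Nodup :=
      climbA_out_nodup g2p pil _ [gid] PySem.Set.empty PySem.Set.empty (by simp [PySem.Set.empty])
    have hBnodup : ((climbB_loop g2p ((pvUni gid g2p).length + 1)
        (PySem.Set.add PySem.Set.empty gid)).filter
          (fun g => pil.contains g)).Nodup :=
      (climbB_loop_nodup g2p _ _ (by simp [PySem.Set.empty, PySem.Set.add, PySem.Set.contains])).filter _
    have hmem : ∀ x, x ∈ (climbA_loop g2p pil
        ((pvUni gid g2p).length * (pvDeg g2p + 1) + 1) [gid] PySem.Set.empty PySem.Set.empty).2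
        ↔ x ∈ (climbB_loop g2p ((pvUni gid g2p).length + 1)
          (PySem.Set.add PySem.Set.empty gid)).filter
            (fun g => pil.contains g) := by
      intro x
      rw [hAchar x, List.mem_filter, hBchar x]
      tauto
    have hperm := (List.perm_ext_iff_of_nodup hAnodup hBnodup).mpr hmem
    have hpw : (PySem.List.sorted ((climbB_loop g2p ((pvUni gid g2p).length + 1)
        (PySem.Set.add PySem.Set.empty gid)).filter
          (fun g => pil.contains g)) (fun x => x)).Pairwise (fun a b => a ≤ b) := by
      simpa using PySem.List.sorted_pairwise ((climbB_loop g2p ((pvUni gid g2p).length + 1)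
        (PySem.Set.add PySem.Set.empty gid)).filter
          (fun g => pil.contains g)) (fun x => x)
    exact PySem.List.sorted_id_eq_of_perm_of_pairwise _ _
      ((PySem.List.sorted_perm _ (fun x => x) false).trans hperm.symm) hpw
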